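-- pv_equiv track=rewrite | github.com/ugo-anums/seo-automation-tools | cannibalization_detector/fetcher.py | filter_branded_queries
-- ===== SOURCE A (Python) =====
-- def filter_branded_queries(
--     cannibalized: dict[str, list[dict]],
--     brand_terms: list[str],
--     extra_terms: list[str] | None = None,
-- ) -> dict[str, list[dict]]:
--     """
--     Remove queries that contain any brand term.
--
--     Args:
--         cannibalized: query → pages dict from group_by_query().
--         brand_terms: auto-detected brand terms from the domain.
--         extra_terms: additional brand terms supplied by the user.
--     """
--     all_terms = [t.lower() for t in brand_terms]
--     if extra_terms:
--         all_terms.extend(t.lower().strip() for t in extra_terms if t.strip())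
--
--     filtered = {}
--     for query, pages in cannibalized.items():
--         query_lower = query.lower()
--         if not any(term in query_lower for term in all_terms):
--             filtered[query] = pages
--
--     return filtered
-- ===== SOURCE B (Python) =====
-- def filter_branded_queries(
--     cannibalized: dict[str, list[dict]],
--     brand_terms: list[str],
--     extra_terms: list[str] | None = None,
-- ) -> dict[str, list[dict]]:
--     """Keep queries containing no brand term: prune a candidate list term by term."""
--     terms = [t.lower() for t in brand_terms]
--     if extra_terms:
--         for t in extra_terms:
--             if t.strip():
--                 terms.append(t.lower().strip())
--
--     # candidates carry the lowered query so it is computed once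
--     candidates = [(q.lower(), q, pages) for q, pages in cannibalized.items()]
--     for term in terms:
--         candidates = [c for c in candidates if term not in c[0]]
--     return {q: pages for _, q, pages in candidates}
-- ===== Notes on version B (the rewrite author's own statement) =====
-- stated objective: alternative
-- what changed: B lowers each query once into a candidate list and prunes that list term by term (outer loop over terms, each pass a filter), instead of A's per-query any()-scan over all terms while building the result dict conditionally.
import Mathlib
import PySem

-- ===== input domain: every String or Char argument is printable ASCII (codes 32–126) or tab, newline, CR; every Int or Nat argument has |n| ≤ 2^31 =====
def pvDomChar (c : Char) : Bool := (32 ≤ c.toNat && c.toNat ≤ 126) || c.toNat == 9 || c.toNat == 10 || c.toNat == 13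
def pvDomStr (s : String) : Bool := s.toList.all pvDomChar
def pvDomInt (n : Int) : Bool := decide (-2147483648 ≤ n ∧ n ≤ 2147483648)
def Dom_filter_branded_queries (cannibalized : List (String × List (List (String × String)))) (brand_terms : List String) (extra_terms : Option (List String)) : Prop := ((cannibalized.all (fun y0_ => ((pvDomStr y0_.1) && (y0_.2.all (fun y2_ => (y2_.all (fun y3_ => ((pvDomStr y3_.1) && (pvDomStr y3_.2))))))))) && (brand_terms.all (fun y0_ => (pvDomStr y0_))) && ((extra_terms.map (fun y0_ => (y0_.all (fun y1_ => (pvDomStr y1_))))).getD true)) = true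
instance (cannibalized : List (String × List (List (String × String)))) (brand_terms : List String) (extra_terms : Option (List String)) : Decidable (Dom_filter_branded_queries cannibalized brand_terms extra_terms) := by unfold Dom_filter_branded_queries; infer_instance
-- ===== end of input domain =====

-- B prunes one candidate list term by term (lowered query computed once) instead of
-- A's per-query scan over all terms; objective: alternative structure, same results.

-- ===== PORT A =====
def filter_branded_queries (cannibalized : List (String × List (List (String × String)))) (brand_terms : List String) (extra_terms : Option (List String)) : List (String × List (List (String × String))) :=
  let all_terms := brand_terms.map PySem.Str.lower
  let all_terms :=
    match extra_terms with
    | none => all_terms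
    | some l =>
        if l = [] then all_terms
        else all_terms ++ (l.filter (fun t => PySem.Str.strip t ≠ "")).map
               (fun t => PySem.Str.strip (PySem.Str.lower t))
  let filtered := cannibalized.foldl
    (fun (filtered : PySem.Dict String (List (List (String × String)))) qp =>
      let query_lower := PySem.Str.lower qp.1
      if !(all_terms.any (fun term => PySem.Str.isIn term query_lower))
      then filtered.insert qp.1 qp.2 else filtered)
    PySem.Dict.empty
  filtered.items

-- ===== PORT B =====
def filter_branded_queries_alt (cannibalized : List (String × List (List (String × String)))) (brand_terms : List String) (extra_terms : Option (List String)) : List (String × List (List (String × String))) :=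
  let terms := brand_terms.map PySem.Str.lower
  let terms :=
    match extra_terms with
    | none => terms
    | some l =>
        if l = [] then terms
        else l.foldl (fun ts t =>
          if PySem.Str.strip t != "" then ts ++ [PySem.Str.strip (PySem.Str.lower t)] else ts) terms
  let candidates := cannibalized.map (fun qp => (PySem.Str.lower qp.1, qp.1, qp.2))
  let candidates := terms.foldl
    (fun cs term => cs.filter (fun e => !PySem.Str.isIn term e.1)) candidates
  (candidates.foldl
    (fun (d : PySem.Dict String (List (List (String × String)))) e => d.insert e.2.1 e.2.2)
    PySem.Dict.empty).items

-- ===== PRECONDITION & SPEC =====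
def Spec_filter_branded_queries (cannibalized : List (String × List (List (String × String)))) (brand_terms : List String) (extra_terms : Option (List String)) (out : List (String × List (List (String × String)))) : Prop := out = filter_branded_queries_alt cannibalized brand_terms extra_terms
instance (cannibalized : List (String × List (List (String × String)))) (brand_terms : List String) (extra_terms : Option (List String)) (out : List (String × List (List (String × String)))) : Decidable (Spec_filter_branded_queries cannibalized brand_terms extra_terms out) := by unfold Spec_filter_branded_queries; infer_instance

-- ===== CLAIM (what is proved, stated in full; the proofs are below) =====
def Claim_equal_filter_branded_queries : Prop := ∀ (cannibalized : List (String × List (List (String × String)))) (brand_terms : List String) (extra_terms : Option (List String)), Dom_filter_branded_queries cannibalized brand_terms extra_terms → Spec_filter_branded_queries cannibalized brand_terms extra_terms (filter_branded_queries cannibalized brand_terms extra_terms)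

-- ===== LEMMAS AND PROOFS =====

-- B's term-by-term pruning loop equals one filter by "no term occurs".
theorem prune_foldl_eq_filter {α : Type} (get : α → String) :
    ∀ (terms : List String) (cs : List α),
      terms.foldl (fun cs term => cs.filter (fun e => !PySem.Str.isIn term (get e))) cs
        = cs.filter (fun e => !(terms.any (fun term => PySem.Str.isIn term (get e)))) := by
  intro terms
  induction terms with
  | nil => intro cs; simp
  | cons t ts ih =>
      intro cs
      simp only [List.foldl_cons, ih, List.filter_filter]
      apply List.filter_congr
      intro e _
      simp [Bool.and_comm]

-- A's conditional-insert loop equals filtering first, then inserting unconditionally.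
theorem foldl_insert_if {α κ ν : Type} [BEq κ] (p : α → Bool) (k : α → κ) (v : α → ν) :
    ∀ (cs : List α) (d : PySem.Dict κ ν),
      cs.foldl (fun d e => if p e then d.insert (k e) (v e) else d) d
        = (cs.filter p).foldl (fun d e => d.insert (k e) (v e)) d := by
  intro cs
  induction cs with
  | nil => intro d; rfl
  | cons e es ih =>
      intro d
      by_cases h : p e = true <;> simp [h, ih]

-- ===== VERDICT (by name: the statement is the Claim_ definition above) =====
theorem filter_branded_queries_spec : Claim_equal_filter_branded_queries := by
  intro c bt et _
  unfold Spec_filter_branded_queries filter_branded_queries filter_branded_queries_alt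
  simp only [PySem.List.foldl_append_if]
  rw [prune_foldl_eq_filter (fun e : String × String × List (List (String × String)) => e.1)]
  have hbne : (fun x => PySem.Str.strip x != "") = (fun t => decide (PySem.Str.strip t ≠ "")) := by
    funext t; cases h : decide (PySem.Str.strip t = "") <;> simp_all [bne]
  rw [hbne]
  generalize (match et with
    | none => bt.map PySem.Str.lower
    | some l =>
        if l = [] then bt.map PySem.Str.lower
        else bt.map PySem.Str.lower ++ (l.filter (fun t => decide (PySem.Str.strip t ≠ ""))).map
               (fun t => PySem.Str.strip (PySem.Str.lower t))) = allts
  rw [foldl_insert_if (κ := String)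
        (p := fun qp : String × List (List (String × String)) =>
          !(allts.any (fun term => PySem.Str.isIn term (PySem.Str.lower qp.1))))
        (k := fun qp => qp.1) (v := fun qp => qp.2)]
  rw [List.filter_map, List.foldl_map]
  rfl
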